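-- pv_equiv track=rewrite | github.com/JustinStitt/CSUF-ICPC-Practice | py3/8178-Latin-Squares.py | isReducedLatinSquare
-- ===== SOURCE A (Python) =====
-- def isReducedLatinSquare(m):
--     # is first row in natural order
--     # is first col in natural order
--     n = len(m)
--     if sorted(m[0]) != m[0]:
--         return False
--     fcol = []
--     for r in range(n):
--         fcol.append(m[r][0])
--     if sorted(fcol) != fcol:
--         return False
--     return True
-- ===== SOURCE B (Python) =====
-- def isReducedLatinSquare(m):
--     # single linear adjacency scans instead of sorting copies
--     row = m[0]
--     for i in range(len(row) - 1):
--         if row[i] > row[i + 1]: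
--             return False
--     for r in range(1, len(m)):
--         if m[r][0] < m[r - 1][0]:
--             return False
--     return True
-- ===== Notes on version B (the rewrite author's own statement) =====
-- stated objective: alternative
-- what changed: Replaces the sort-and-compare tests (sorted(x) != x) and the explicit first-column list build with two adjacency scans over the first row and the first column, with early exit on the first inversion.
import Mathlib
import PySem

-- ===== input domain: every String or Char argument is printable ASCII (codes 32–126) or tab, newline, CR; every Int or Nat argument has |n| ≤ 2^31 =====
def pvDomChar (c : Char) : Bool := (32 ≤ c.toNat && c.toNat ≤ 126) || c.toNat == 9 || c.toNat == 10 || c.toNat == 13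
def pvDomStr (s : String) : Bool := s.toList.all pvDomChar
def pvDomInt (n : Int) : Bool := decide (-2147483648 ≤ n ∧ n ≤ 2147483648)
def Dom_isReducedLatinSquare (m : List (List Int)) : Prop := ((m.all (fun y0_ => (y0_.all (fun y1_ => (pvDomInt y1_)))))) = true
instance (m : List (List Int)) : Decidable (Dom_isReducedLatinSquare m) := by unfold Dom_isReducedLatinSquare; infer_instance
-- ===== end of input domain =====

-- B replaces the two sort-and-compare tests by linear adjacency scans with early exit; equal return values on Pre_.

-- ===== PORT A =====
def isReducedLatinSquare (m : List (List Int)) : Bool :=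
  -- n = len(m)
  let n : Int := PySem.List.len m
  -- if sorted(m[0]) != m[0]: return False
  let row0 : List Int := (PySem.List.pyGet? m 0).getD []
  if PySem.List.sorted row0 (fun x => x) ≠ row0 then false
  else
    -- fcol = []; for r in range(n): fcol.append(m[r][0])
    let fcol : List Int :=
      (PySem.List.pyRange 0 n 1).foldl
        (fun acc r => acc ++ [PySem.List.pyGetD (PySem.List.pyGetD m r []) 0 0]) []
    -- if sorted(fcol) != fcol: return False
    if PySem.List.sorted fcol (fun x => x) ≠ fcol then false
    else true

-- ===== PORT B =====
-- for i in range(len(row)-1): if row[i] > row[i+1]: return False  — adjacent scan of the first row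
def pvRowScan : List Int → Bool
  | [] => true
  | [_] => true
  | a :: b :: t => if a > b then false else pvRowScan (b :: t)

-- for r in range(1, len(m)): if m[r][0] < m[r-1][0]: return False  — scan of first-column heads, prev = m[r-1][0]
def pvColScan : Int → List (List Int) → Bool
  | _, [] => true
  | prev, row :: rest =>
      let h := PySem.List.pyGetD row 0 0
      if h < prev then false else pvColScan h rest

def isReducedLatinSquare_alt (m : List (List Int)) : Bool :=
  let row : List Int := (PySem.List.pyGet? m 0).getD []
  if pvRowScan row then
    match m with
    | [] => true
    | r0 :: rest => pvColScan (PySem.List.pyGetD r0 0 0) rest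
  else false

-- ===== PRECONDITION & SPEC =====
-- Pre_ excludes exactly the inputs on which A raises IndexError: the empty matrix (m[0]),
-- and matrices whose first row is sorted but some row is empty (m[r][0] while building the first column).
def Pre_isReducedLatinSquare (m : List (List Int)) : Prop :=
  m ≠ [] ∧ (¬ (m.headD []).Pairwise (fun a b => a ≤ b) ∨ ∀ row ∈ m, row ≠ [])
instance (m : List (List Int)) : Decidable (Pre_isReducedLatinSquare m) := by
  unfold Pre_isReducedLatinSquare; infer_instance

def pvWitness_isReducedLatinSquare : List (List Int) := [[1, 2], [1, 3]]

def Spec_isReducedLatinSquare (m : List (List Int)) (out : Bool) : Prop := out = isReducedLatinSquare_alt m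
instance (m : List (List Int)) (out : Bool) : Decidable (Spec_isReducedLatinSquare m out) := by
  unfold Spec_isReducedLatinSquare; infer_instance

-- ===== CLAIM (what is proved, stated in full; the proofs are below) =====
def Claim_equal_isReducedLatinSquare : Prop := ∀ (m : List (List Int)), Dom_isReducedLatinSquare m → Pre_isReducedLatinSquare m → Spec_isReducedLatinSquare m (isReducedLatinSquare m)

-- ===== LEMMAS AND PROOFS =====

lemma pvRowScan_iff : ∀ l : List Int, pvRowScan l = true ↔ List.IsChain (fun a b => a ≤ b) l
  | [] => by simp [pvRowScan]
  | [_] => by simp [pvRowScan]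
  | a :: b :: t => by
      rw [pvRowScan, List.isChain_cons_cons, ← pvRowScan_iff (b :: t)]
      by_cases h : a > b
      · simp [h]
      · simp [h]; omega

lemma pvColScan_iff : ∀ (p : Int) (rs : List (List Int)),
    pvColScan p rs = true ↔
      List.IsChain (fun a b => a ≤ b) (p :: rs.map (fun row => PySem.List.pyGetD row 0 0))
  | _, [] => by simp [pvColScan]
  | p, row :: rest => by
      rw [pvColScan, List.map_cons, List.isChain_cons_cons,
        ← pvColScan_iff (PySem.List.pyGetD row 0 0) rest]
      by_cases h : PySem.List.pyGetD row 0 0 < p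
      · simp [h]
      · simp [h]; omega

lemma sorted_id_eq_iff (l : List Int) :
    PySem.List.sorted l (fun x => x) = l ↔ l.Pairwise (fun a b => a ≤ b) := by
  constructor
  · intro h
    have := PySem.List.sorted_pairwise l (fun x => x)
    rwa [h] at this
  · intro h
    exact PySem.List.sorted_eq_self_of_pairwise l (fun x => x) h

-- ===== VERDICT (by name: the statement is the Claim_ definition above) =====
theorem isReducedLatinSquare_spec : Claim_equal_isReducedLatinSquare := by
  intro m _ hpre
  unfold Spec_isReducedLatinSquare
  cases m with
  | nil => exact absurd rfl hpre.1
  | cons r0 rest =>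
    unfold isReducedLatinSquare isReducedLatinSquare_alt
    simp only [PySem.List.pyGet?_zero_cons, Option.getD_some, PySem.List.len_eq,
      PySem.List.foldl_pyRange_zero_pyGetD' (r0 :: rest) ([] : List Int)
        (fun acc row => acc ++ [PySem.List.pyGetD row 0 0]) [],
      PySem.List.foldl_append_singleton_eq_map, List.nil_append, List.map_cons]
    by_cases hr : (r0 : List Int).Pairwise (fun a b => a ≤ b)
    · have hs : PySem.List.sorted r0 (fun x => x) = r0 := (sorted_id_eq_iff r0).mpr hr
      have hrow : pvRowScan r0 = true := by
        rw [pvRowScan_iff]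
        exact List.isChain_iff_pairwise.mpr hr
      by_cases hc : List.IsChain (fun a b => a ≤ b)
          (PySem.List.pyGetD r0 0 0 :: rest.map (fun row => PySem.List.pyGetD row 0 0))
      · have hs2 : PySem.List.sorted
            (PySem.List.pyGetD r0 0 0 :: rest.map (fun row => PySem.List.pyGetD row 0 0))
            (fun x => x) =
            PySem.List.pyGetD r0 0 0 :: rest.map (fun row => PySem.List.pyGetD row 0 0) :=
          (sorted_id_eq_iff _).mpr (List.isChain_iff_pairwise.mp hc)
        simp [hs, hs2, hrow, (pvColScan_iff _ _).mpr hc]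
      · have h1 : pvColScan (PySem.List.pyGetD r0 0 0) rest = false := by
          rw [← Bool.not_eq_true, pvColScan_iff]; exact hc
        have h2 : PySem.List.sorted
            (PySem.List.pyGetD r0 0 0 :: rest.map (fun row => PySem.List.pyGetD row 0 0))
            (fun x => x) ≠
            PySem.List.pyGetD r0 0 0 :: rest.map (fun row => PySem.List.pyGetD row 0 0) := by
          rw [Ne, sorted_id_eq_iff]
          exact fun hp => hc (List.isChain_iff_pairwise.mpr hp)
        simp [hs, hrow, h1, h2]
    · have hs : PySem.List.sorted r0 (fun x => x) ≠ r0 := by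
        rw [Ne, sorted_id_eq_iff]; exact hr
      have hrow : pvRowScan r0 = false := by
        rw [← Bool.not_eq_true, pvRowScan_iff]
        exact fun hc => hr (List.isChain_iff_pairwise.mp hc)
      simp [hs, hrow]
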